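-- pv_equiv track=rewrite | github.com/kennardliong/frag-predict-final | fragpred.py | find_unclosed_ring_index
-- ===== SOURCE A (Python) =====
-- def find_unclosed_ring_index(smiles_list, ring_numbers):
--     """Find the index of the unclosed ring number in the SMILES list."""
--     ring_dict = {}
--     for i, char in enumerate(smiles_list):
--         if char.isdigit():
--             if char in ring_dict:
--                 del ring_dict[char]  # Ring is closed, remove from dictionary
--             else:
--                 ring_dict[char] = i  # Unclosed ring found
--     if ring_dict:
--         # Return the position of the first unclosed ring found
--         return list(ring_dict.values())[0]
--     return None
-- ===== SOURCE B (Python) =====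
-- def find_unclosed_ring_index(smiles_list, ring_numbers):
--     """Find the index of the unclosed ring number in the SMILES list."""
--     # The answer is the first index that is the LAST occurrence of a digit
--     # token appearing an odd number of times.
--     for i, char in enumerate(smiles_list):
--         if char.isdigit() and smiles_list.count(char) % 2 == 1 and char not in smiles_list[i + 1:]:
--             return i
--     return None
-- ===== Notes on version B (the rewrite author's own statement) =====
-- stated objective: simpler
-- what changed: Replaces the toggling dict with del/insertion-order tricks by a direct early-return scan: return the first index that is the last occurrence of an odd-count digit token, making the specification explicit.
import Mathlib
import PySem

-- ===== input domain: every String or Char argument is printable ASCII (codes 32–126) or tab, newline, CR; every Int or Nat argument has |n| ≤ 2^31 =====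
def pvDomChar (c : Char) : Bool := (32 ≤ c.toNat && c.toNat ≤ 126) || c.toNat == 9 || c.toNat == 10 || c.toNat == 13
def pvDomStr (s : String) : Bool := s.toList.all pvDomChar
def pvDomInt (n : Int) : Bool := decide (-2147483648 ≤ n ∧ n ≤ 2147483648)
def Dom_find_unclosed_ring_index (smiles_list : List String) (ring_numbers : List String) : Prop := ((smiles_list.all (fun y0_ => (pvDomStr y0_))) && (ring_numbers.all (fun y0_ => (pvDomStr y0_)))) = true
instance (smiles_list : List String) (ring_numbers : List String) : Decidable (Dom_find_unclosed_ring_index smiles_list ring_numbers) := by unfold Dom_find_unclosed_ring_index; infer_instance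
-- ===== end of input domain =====

-- B replaces A's toggling dict (del + insertion-order trick) by a direct early-return
-- scan: return the first index that is the last occurrence of an odd-count digit token
-- (objective: simpler; not faster).

-- ===== PORT A =====
def find_unclosed_ring_index (smiles_list : List String) (_ring_numbers : List String) : Option Int :=
  let ring_dict : PySem.Dict String Int :=
    (PySem.List.enumerate smiles_list 0).foldl
      (fun d p =>
        if PySem.Str.strIsdigit p.2 then
          if d.contains p.2 then d.erase p.2 else d.insert p.2 p.1
        else d)
      PySem.Dict.empty
  ring_dict.values.head?

-- ===== PORT B =====
def find_unclosed_ring_index_alt (smiles_list : List String) (_ring_numbers : List String) : Option Int :=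
  ((PySem.List.enumerate smiles_list 0).find? (fun p =>
      PySem.Str.strIsdigit p.2
        && (smiles_list.count p.2 % 2 == 1)
        && !((PySem.List.slice smiles_list (some (p.1 + 1)) none).contains p.2))).map (·.1)

-- ===== PRECONDITION & SPEC =====
def Spec_find_unclosed_ring_index (smiles_list : List String) (ring_numbers : List String) (out : Option Int) : Prop := out = find_unclosed_ring_index_alt smiles_list ring_numbers
instance (smiles_list : List String) (ring_numbers : List String) (out : Option Int) : Decidable (Spec_find_unclosed_ring_index smiles_list ring_numbers out) := by unfold Spec_find_unclosed_ring_index; infer_instance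

-- ===== CLAIM (what is proved, stated in full; the proofs are below) =====
def Claim_equal_find_unclosed_ring_index : Prop := ∀ (smiles_list : List String) (ring_numbers : List String), Dom_find_unclosed_ring_index smiles_list ring_numbers → Spec_find_unclosed_ring_index smiles_list ring_numbers (find_unclosed_ring_index smiles_list ring_numbers)

-- ===== LEMMAS AND PROOFS =====

def pvQ (full : List String) (p : Int × String) : Bool :=
  PySem.Str.strIsdigit p.2
    && (full.count p.2 % 2 == 1)
    && !((PySem.List.slice full (some (p.1 + 1)) none).contains p.2)

def pvStep (d : PySem.Dict String Int) (p : Int × String) : PySem.Dict String Int :=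
  if PySem.Str.strIsdigit p.2 then
    if d.contains p.2 then d.erase p.2 else d.insert p.2 p.1
  else d

def pvItems (full : List String) : List (String × Int) :=
  ((PySem.List.enumerate full 0).filter (pvQ full)).map (fun p => (p.2, p.1))

lemma pvQ_at (full : List String) (k : Nat) (c : String) :
    pvQ full ((k : Int), c)
      = (PySem.Str.strIsdigit c && (full.count c % 2 == 1) && !((full.drop (k+1)).contains c)) := by
  have h1 : ((k : Int) + 1) = (((k + 1 : Nat) : Int)) := by push_cast; ring
  unfold pvQ
  rw [show ((k:Int), c).1 = (k:Int) from rfl]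
  rw [h1, PySem.List.slice_from_natCast]

lemma pvQ_append (pre : List String) (x c : String) (k : Nat) (hk : k < pre.length) :
    pvQ (pre ++ [x]) ((k : Int), c) = (pvQ pre ((k : Int), c) && !(c == x)) := by
  rw [pvQ_at, pvQ_at]
  have hd : (pre ++ [x]).drop (k+1) = pre.drop (k+1) ++ [x] :=
    List.drop_append_of_le_length (by omega)
  by_cases hcx : c = x
  · subst hcx
    simp [hd]
  · simp [hd, List.count_append, hcx, Ne.symm hcx]

lemma pvLastOcc (l : List String) (c : String) (h : c ∈ l) :
    ∃ j, ∃ hj : j < l.length, l[j] = c ∧ c ∉ l.drop (j+1) := by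
  induction l with
  | nil => cases h
  | cons x t ih =>
    by_cases hc : c ∈ t
    · obtain ⟨j, hj, h1, h2⟩ := ih hc
      exact ⟨j+1, by simpa using hj, by simpa using h1, by simpa using h2⟩
    · rcases List.mem_cons.mp h with h | h
      · exact ⟨0, by simp, by simp [h], by simpa using hc⟩
      · exact absurd h hc

lemma pvAnyC (pre : List String) (c : String) :
    ((PySem.List.enumerate pre 0).filter (pvQ pre)).any (fun p => p.2 == c)
      = (PySem.Str.strIsdigit c && (pre.count c % 2 == 1)) := by
  by_cases hrhs : (PySem.Str.strIsdigit c && (pre.count c % 2 == 1)) = true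
  · rw [hrhs]
    have hodd : pre.count c % 2 = 1 := by
      have := (Bool.and_eq_true _ _).mp hrhs
      simpa using this.2
    have hmem : c ∈ pre := List.count_pos_iff.mp (by omega)
    obtain ⟨j, hj, h1, h2⟩ := pvLastOcc pre c hmem
    apply List.any_eq_true.mpr
    refine ⟨((j : Int), c), List.mem_filter.mpr ⟨?_, ?_⟩, by simp⟩
    · exact (PySem.List.mem_enumerate_iff _ _ _).mpr ⟨j, hj, by simp [h1]⟩
    · rw [pvQ_at]
      have hdigit := (Bool.and_eq_true _ _).mp hrhs
      simp [hodd, h2]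
      simpa using hdigit.1
  · rw [Bool.eq_false_iff.mpr hrhs]
    apply List.any_eq_false.mpr
    rintro p hp hpc
    have hq := (List.mem_filter.mp hp).2
    obtain ⟨k, hk, hpk⟩ := (PySem.List.mem_enumerate_iff _ _ _).mp (List.mem_filter.mp hp).1
    have hpc' : p.2 = c := by simpa using hpc
    have hp1 : p.1 = (k : Int) := by rw [hpk]; simp
    have : pvQ pre ((k : Int), c) = true := by
      rw [← hp1, ← hpc']
      simpa using hq
    rw [pvQ_at] at this
    exact hrhs (by
      have := (Bool.and_eq_true _ _).mp this
      exact this.1)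

lemma pvStep_items (pre : List String) (x : String) (d : PySem.Dict String Int)
    (h : d.items = pvItems pre) :
    (pvStep d ((pre.length : Int), x)).items = pvItems (pre ++ [x]) := by
  have hcont : d.contains x
      = (PySem.Str.strIsdigit x && (pre.count x % 2 == 1)) := by
    show d.items.any (fun p => p.1 == x) = _
    rw [h]
    unfold pvItems
    rw [List.any_map, ← pvAnyC pre x]
    rfl
  -- RHS normal form
  have hrhs : pvItems (pre ++ [x])
      = (((PySem.List.enumerate pre 0).filter (pvQ pre)).filter (fun p => !(p.2 == x))).map (fun p => (p.2, p.1))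
        ++ (if PySem.Str.strIsdigit x && ((pre.count x + 1) % 2 == 1) then [(x, (pre.length : Int))] else []) := by
    unfold pvItems
    rw [PySem.List.enumerate_append]
    have he1 : PySem.List.enumerate [x] ((0 : Int) + (pre.length : Int)) = [((pre.length : Int), x)] := by
      rw [PySem.List.enumerate_cons, PySem.List.enumerate_nil]
      norm_num
    rw [he1, List.filter_append]
    have hfc : List.filter (pvQ (pre ++ [x])) (PySem.List.enumerate pre 0)
        = List.filter (fun p => pvQ pre p && !(p.2 == x)) (PySem.List.enumerate pre 0) := by
      apply List.filter_congr
      intro p hp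
      obtain ⟨k, hk, hpk⟩ := (PySem.List.mem_enumerate_iff _ _ _).mp hp
      have : p = ((k : Int), pre[k]) := by rw [hpk]; simp
      subst this
      exact pvQ_append pre x _ k hk
    have hcomm : List.filter (fun p => pvQ pre p && !(p.2 == x)) (PySem.List.enumerate pre 0)
        = List.filter (fun p => !(p.2 == x) && pvQ pre p) (PySem.List.enumerate pre 0) :=
      List.filter_congr (fun p _ => Bool.and_comm _ _)
    rw [hfc, hcomm, ← List.filter_filter]
    have hsing : List.filter (pvQ (pre ++ [x])) [((pre.length : Int), x)]
        = (if PySem.Str.strIsdigit x && ((pre.count x + 1) % 2 == 1) then [((pre.length : Int), x)] else []) := by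
      have hv : pvQ (pre ++ [x]) ((pre.length : Int), x)
          = (PySem.Str.strIsdigit x && ((pre.count x + 1) % 2 == 1)) := by
        rw [pvQ_at]
        have hdrop : (pre ++ [x]).drop (pre.length + 1) = [] :=
          List.drop_eq_nil_of_le (by simp)
        have hcount : (pre ++ [x]).count x = pre.count x + 1 := by simp
        rw [hdrop, hcount]
        simp
      cases hcase : (PySem.Str.strIsdigit x && ((pre.count x + 1) % 2 == 1)) <;>
        simp only [List.filter_cons, List.filter_nil, hv, hcase]
    rw [hsing, List.map_append]
    congr 1
    split <;> simp
  rw [hrhs]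
  by_cases hdig : PySem.Str.strIsdigit x = true
  · have hdig' : PySem.Chars.strIsdigit x.toList = true := by simpa using hdig
    by_cases hin : d.contains x = true
    · -- close the ring: erase
      have hodd : pre.count x % 2 = 1 := by
        rw [hcont, hdig] at hin
        simpa using hin
      have hev : ((pre.count x + 1) % 2 == 1) = false := by
        simp; omega
      have hstep : pvStep d ((pre.length : Int), x) = d.erase x := by
        unfold pvStep
        simp [hdig', hin]
      rw [hstep, hdig, hev]
      show d.items.filter (fun p => !(p.1 == x)) = _
      rw [h]
      unfold pvItems
      rw [List.filter_map]
      simp [Function.comp]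
    · -- open a ring: insert
      have hnot : d.contains x = false := Bool.eq_false_iff.mpr hin
      have hnodd : (pre.count x % 2 == 1) = false := by
        rw [hcont, hdig] at hnot
        simpa using hnot
      have hodd1 : ((pre.count x + 1) % 2 == 1) = true := by
        simp at hnodd ⊢
        omega
      have hstep : pvStep d ((pre.length : Int), x) = d.insert x (pre.length : Int) := by
        unfold pvStep
        simp [hdig', hnot]
      rw [hstep, PySem.Dict.items_insert_of_not_contains d _ hnot, h, hdig, hodd1]
      have hnone : ((PySem.List.enumerate pre 0).filter (pvQ pre)).filter (fun p => !(p.2 == x))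
          = (PySem.List.enumerate pre 0).filter (pvQ pre) := by
        apply List.filter_eq_self.mpr
        intro p hp
        have hany : ((PySem.List.enumerate pre 0).filter (pvQ pre)).any (fun p => p.2 == x) = false := by
          rw [pvAnyC, hdig, hnodd]; rfl
        have := List.any_eq_false.mp hany p hp
        simpa using this
      rw [hnone]
      simp [pvItems]
  · have hdigf : PySem.Str.strIsdigit x = false := Bool.eq_false_iff.mpr hdig
    have hdigf' : PySem.Chars.strIsdigit x.toList = false := by simpa using hdigf
    have hstep : pvStep d ((pre.length : Int), x) = d := by
      unfold pvStep
      simp [hdigf']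
    rw [hstep, hdigf]
    have hnone : ((PySem.List.enumerate pre 0).filter (pvQ pre)).filter (fun p => !(p.2 == x))
        = (PySem.List.enumerate pre 0).filter (pvQ pre) := by
      apply List.filter_eq_self.mpr
      intro p hp
      have hany : ((PySem.List.enumerate pre 0).filter (pvQ pre)).any (fun p => p.2 == x) = false := by
        rw [pvAnyC, hdigf]; rfl
      have := List.any_eq_false.mp hany p hp
      simpa using this
    rw [hnone, h]
    simp [pvItems]

lemma pvFold (suf : List String) (pre : List String) (d : PySem.Dict String Int)
    (h : d.items = pvItems pre) :
    ((PySem.List.enumerate suf (pre.length : Int)).foldl pvStep d).items = pvItems (pre ++ suf) := by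
  induction suf generalizing pre d with
  | nil => simpa [PySem.List.enumerate_nil] using h
  | cons y t ih =>
    rw [PySem.List.enumerate_cons, List.foldl_cons]
    have hlen : (pre.length : Int) + 1 = ((pre ++ [y]).length : Int) := by
      simp
    rw [hlen, ih (pre ++ [y]) _ (pvStep_items pre y d h)]
    simp

-- ===== VERDICT (by name: the statement is the Claim_ definition above) =====
theorem find_unclosed_ring_index_spec : Claim_equal_find_unclosed_ring_index := by
  intro full r _
  unfold Spec_find_unclosed_ring_index find_unclosed_ring_index find_unclosed_ring_index_alt
  have hstep : (fun (d : PySem.Dict String Int) (p : Int × String) =>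
      if PySem.Str.strIsdigit p.2 then
        if d.contains p.2 then d.erase p.2 else d.insert p.2 p.1
      else d) = pvStep := rfl
  have hq : (fun (p : Int × String) =>
      PySem.Str.strIsdigit p.2
        && (full.count p.2 % 2 == 1)
        && !((PySem.List.slice full (some (p.1 + 1)) none).contains p.2)) = pvQ full := rfl
  rw [hstep, hq]
  have h0 : ((PySem.Dict.empty : PySem.Dict String Int)).items = pvItems ([] : List String) := rfl
  have hfold := pvFold full [] PySem.Dict.empty h0
  simp only [List.length_nil, Int.natCast_zero, List.nil_append] at hfold
  show ((PySem.List.enumerate full 0).foldl pvStep PySem.Dict.empty).values.head? = _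
  have hv : ((PySem.List.enumerate full 0).foldl pvStep PySem.Dict.empty).values
      = (((PySem.List.enumerate full 0).filter (pvQ full)).map (fun p => (p.2, p.1))).map (·.2) := by
    show (((PySem.List.enumerate full 0).foldl pvStep PySem.Dict.empty).items).map (·.2) = _
    rw [hfold]; rfl
  rw [hv, List.map_map, ← List.head?_filter, ← List.head?_map]
  rfl
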